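-- pv_equiv track=rewrite | github.com/DanielEshel/RAID-Storage-Legends | server/server_logic.py | _get_parity_blocks
-- ===== SOURCE A (Python) =====
-- def _get_parity_blocks(number_of_blocks):
--     """
--     get dictionary of each computer index and a list representing the parity.
--     :param number_of_blocks: number of storage computers to split the file into.
--     :return: return the dictionary.
--     """
--     if number_of_blocks > 1:  # only make parity blocks when there's more than one storage computer.
--         parity_blocks = {}  # dictionary of parity blocks
--         # for every data block, make a matching parity block that has the n//2 next blocks
--         for index in range(number_of_blocks):
--             parity_blocks[index] = [str((index + 1) % number_of_blocks).zfill(2)]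
--             for j in range(2, number_of_blocks // 2 + 1):
--                 computer_index = (index + j) % number_of_blocks
--                 if index in parity_blocks.keys():
--                     parity_blocks[index].append(str(computer_index).zfill(2))
--
--         return parity_blocks
-- ===== SOURCE B (Python) =====
-- def _get_parity_blocks(number_of_blocks):
--     """
--     Same result as A: for n > 1, map each index to the .zfill(2) labels of its
--     n//2 cyclic successors; None otherwise.  B precomputes the formatted labels
--     once and takes each row as one slice of the doubled label table, instead of
--     re-formatting with modular arithmetic in a nested loop.
--     """
--     if number_of_blocks > 1:
--         labels = [str(k).zfill(2) for k in range(number_of_blocks)]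
--         doubled = labels + labels
--         half = number_of_blocks // 2
--         return {index: doubled[index + 1: index + 1 + half]
--                 for index in range(number_of_blocks)}
-- ===== Notes on version B (the rewrite author's own statement) =====
-- stated objective: simpler
-- what changed: B formats each block label once into a table, doubles the table, and reads every computer's parity row as a single cyclic slice, replacing A's nested loop that re-formats labels with modular arithmetic and appends through the dict.
import Mathlib
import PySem

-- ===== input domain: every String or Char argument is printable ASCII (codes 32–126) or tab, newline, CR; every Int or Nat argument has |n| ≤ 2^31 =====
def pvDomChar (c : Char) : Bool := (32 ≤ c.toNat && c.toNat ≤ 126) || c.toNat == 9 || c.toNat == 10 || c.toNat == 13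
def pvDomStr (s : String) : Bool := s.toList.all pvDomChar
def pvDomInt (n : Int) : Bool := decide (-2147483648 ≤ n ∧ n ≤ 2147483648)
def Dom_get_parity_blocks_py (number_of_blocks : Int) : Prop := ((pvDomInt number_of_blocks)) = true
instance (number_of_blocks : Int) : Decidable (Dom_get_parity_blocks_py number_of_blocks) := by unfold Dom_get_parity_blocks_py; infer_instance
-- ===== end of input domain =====

-- B builds the zfill(2) label table once and slices the doubled table, instead of
-- A's nested loop re-formatting labels with modular arithmetic (objective: simpler).

-- ===== PORT A =====
def get_parity_blocks_py (number_of_blocks : Int) : Option (List (Int × List String)) :=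
  if number_of_blocks > 1 then
    let parity_blocks : PySem.Dict Int (List String) :=
      (PySem.List.pyRange 0 number_of_blocks 1).foldl (fun parity_blocks index =>
        let parity_blocks := parity_blocks.insert index
          [PySem.Str.zfill (PySem.Int.toStr (PySem.Int.mod (index + 1) number_of_blocks)) 2]
        (PySem.List.pyRange 2 (PySem.Int.floordiv number_of_blocks 2 + 1) 1).foldl
          (fun parity_blocks j =>
            let computer_index := PySem.Int.mod (index + j) number_of_blocks
            if parity_blocks.contains index then
              parity_blocks.modify index []
                (fun v => v ++ [PySem.Str.zfill (PySem.Int.toStr computer_index) 2])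
            else parity_blocks) parity_blocks) PySem.Dict.empty
    some parity_blocks.items
  else none

-- ===== PORT B =====
-- the dict comprehension runs over the distinct keys range(n), so its items list
-- in insertion order is exactly this map
def get_parity_blocks_py_alt (number_of_blocks : Int) : Option (List (Int × List String)) :=
  if number_of_blocks > 1 then
    let labels := (PySem.List.pyRange 0 number_of_blocks 1).map
      (fun k => PySem.Str.zfill (PySem.Int.toStr k) 2)
    let doubled := labels ++ labels
    let half := PySem.Int.floordiv number_of_blocks 2
    some ((PySem.List.pyRange 0 number_of_blocks 1).map (fun index =>
      (index, PySem.List.slice doubled (some (index + 1)) (some (index + 1 + half)))))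
  else none

-- ===== PRECONDITION & SPEC =====
def Spec_get_parity_blocks_py (number_of_blocks : Int) (out : Option (List (Int × List String))) : Prop := out = get_parity_blocks_py_alt number_of_blocks
instance (number_of_blocks : Int) (out : Option (List (Int × List String))) : Decidable (Spec_get_parity_blocks_py number_of_blocks out) := by unfold Spec_get_parity_blocks_py; infer_instance

-- ===== CLAIM (what is proved, stated in full; the proofs are below) =====
def Claim_equal_get_parity_blocks_py : Prop := ∀ (number_of_blocks : Int), Dom_get_parity_blocks_py number_of_blocks → Spec_get_parity_blocks_py number_of_blocks (get_parity_blocks_py number_of_blocks)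

-- ===== LEMMAS AND PROOFS =====

-- the zfill(2) label of block k
def gpLab (k : Int) : String := PySem.Str.zfill (PySem.Int.toStr k) 2

-- the parity row stored for key i
def gpF (n i : Int) : List String :=
  (PySem.List.pyRange 1 (PySem.Int.floordiv n 2 + 1) 1).map
    (fun j => gpLab (PySem.Int.mod (i + j) n))

-- A's dict-building fold, named (proof-side abbreviation; definitionally the port's term)
def gpA (n m : Int) : PySem.Dict Int (List String) :=
  (PySem.List.pyRange 0 m 1).foldl (fun parity_blocks index =>
    let parity_blocks := parity_blocks.insert index
      [PySem.Str.zfill (PySem.Int.toStr (PySem.Int.mod (index + 1) n)) 2]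
    (PySem.List.pyRange 2 (PySem.Int.floordiv n 2 + 1) 1).foldl
      (fun parity_blocks j =>
        let computer_index := PySem.Int.mod (index + j) n
        if parity_blocks.contains index then
          parity_blocks.modify index []
            (fun v => v ++ [PySem.Str.zfill (PySem.Int.toStr computer_index) 2])
        else parity_blocks) parity_blocks) PySem.Dict.empty

-- A's inner loop: keys unchanged, and the row at k gets L's labels appended
theorem gp_inner (n k : Int) (L : List Int) (d : PySem.Dict Int (List String))
    (hc : d.contains k = true) :
    (L.foldl (fun parity_blocks j =>
        let computer_index := PySem.Int.mod (k + j) n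
        if parity_blocks.contains k then
          parity_blocks.modify k []
            (fun v => v ++ [PySem.Str.zfill (PySem.Int.toStr computer_index) 2])
        else parity_blocks) d).keys = d.keys ∧
    ∀ i : Int, (L.foldl (fun parity_blocks j =>
        let computer_index := PySem.Int.mod (k + j) n
        if parity_blocks.contains k then
          parity_blocks.modify k []
            (fun v => v ++ [PySem.Str.zfill (PySem.Int.toStr computer_index) 2])
        else parity_blocks) d).getD i []
      = if i = k then d.getD k [] ++
          L.map (fun j => PySem.Str.zfill (PySem.Int.toStr (PySem.Int.mod (k + j) n)) 2)
        else d.getD i [] := by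
  induction L generalizing d with
  | nil => simp
  | cons j L ih =>
    simp only [List.foldl_cons, List.map_cons, hc, if_true]
    have hc' : (d.modify k []
        (fun v => v ++ [PySem.Str.zfill (PySem.Int.toStr (PySem.Int.mod (k + j) n)) 2])).contains k = true := by
      rw [PySem.Dict.contains_modify]; simp
    obtain ⟨hk, hg⟩ := ih _ hc'
    refine ⟨by rw [hk, PySem.Dict.keys_modify, PySem.Dict.keys_insert_of_contains _ _ hc], ?_⟩
    intro i
    rw [hg i]
    by_cases hi : i = k
    · subst hi
      simp
    · simp [hi, PySem.Dict.getD_modify]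

-- A's outer loop, cut at any prefix range(0, m): keys and rows
theorem gp_outer (n : Int) (hn : 1 < n) (m : Nat) (hm : (m : Int) ≤ n) :
    (gpA n (m : Int)).keys = PySem.List.pyRange 0 (m : Int) 1 ∧
    ∀ i : Int, 0 ≤ i → i < (m : Int) → (gpA n (m : Int)).getD i [] = gpF n i := by
  induction m with
  | zero =>
    constructor
    · simp [gpA, PySem.List.pyRange_one_eq_nil]
    · intro i h0 h1; omega
  | succ m ih =>
    have hm' : (m : Int) ≤ n := by push_cast at hm ⊢; omega
    obtain ⟨hk, hg⟩ := ih hm'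
    have hsplit : PySem.List.pyRange 0 ((m : Int) + 1) 1
        = PySem.List.pyRange 0 (m : Int) 1 ++ [(m : Int)] :=
      PySem.List.pyRange_one_succ_right (by positivity)
    have hcast : ((m + 1 : Nat) : Int) = (m : Int) + 1 := by push_cast; ring
    have hstep : gpA n ((m + 1 : Nat) : Int)
        = (PySem.List.pyRange 2 (PySem.Int.floordiv n 2 + 1) 1).foldl
          (fun parity_blocks j =>
            let computer_index := PySem.Int.mod ((m : Int) + j) n
            if parity_blocks.contains (m : Int) then
              parity_blocks.modify (m : Int) []
                (fun v => v ++ [PySem.Str.zfill (PySem.Int.toStr computer_index) 2])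
            else parity_blocks)
          ((gpA n (m : Int)).insert (m : Int)
            [PySem.Str.zfill (PySem.Int.toStr (PySem.Int.mod ((m : Int) + 1) n)) 2]) := by
      rw [gpA, hcast, hsplit, List.foldl_append, List.foldl_cons, List.foldl_nil]
      rfl
    -- the new key m is fresh
    have hfresh : (gpA n (m : Int)).contains (m : Int) = false := by
      rw [PySem.Dict.contains_eq_decide_mem_keys, hk]
      simp [PySem.List.mem_pyRange_one]
    have hc1 : ((gpA n (m : Int)).insert (m : Int)
        [PySem.Str.zfill (PySem.Int.toStr (PySem.Int.mod ((m : Int) + 1) n)) 2]).contains (m : Int) = true := by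
      rw [PySem.Dict.contains_insert]; simp
    obtain ⟨hk2, hg2⟩ := gp_inner n (m : Int)
      (PySem.List.pyRange 2 (PySem.Int.floordiv n 2 + 1) 1) _ hc1
    rw [hcast] at hstep ⊢
    rw [hstep]
    constructor
    · rw [hk2, PySem.Dict.keys_insert_of_not_contains _ _ hfresh, hk, hsplit]
    · intro i h0 h1
      rw [hg2 i]
      by_cases hi : i = (m : Int)
      · subst hi
        rw [if_pos rfl, PySem.Dict.getD_insert, if_pos rfl]
        have hfd : 1 ≤ PySem.Int.floordiv n 2 := by
          rw [PySem.Int.le_floordiv_iff_mul_le (by norm_num)]; omega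
        have hcons : PySem.List.pyRange 1 (PySem.Int.floordiv n 2 + 1) 1
            = 1 :: PySem.List.pyRange 2 (PySem.Int.floordiv n 2 + 1) 1 := by
          have := PySem.List.pyRange_one_cons
            (show (1:Int) < PySem.Int.floordiv n 2 + 1 by omega)
          simpa using this
        rw [gpF, hcons, List.map_cons]
        simp [gpLab]
      · rw [if_neg hi, PySem.Dict.getD_insert, if_neg hi, hg i h0 (by omega)]

-- the row equals B's slice of the doubled label table
theorem gpF_eq_slice (n i : Int) (hn : 1 < n) (h0 : 0 ≤ i) (h1 : i < n) :
    gpF n i = PySem.List.slice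
      ((PySem.List.pyRange 0 n 1).map (fun k => PySem.Str.zfill (PySem.Int.toStr k) 2) ++
       (PySem.List.pyRange 0 n 1).map (fun k => PySem.Str.zfill (PySem.Int.toStr k) 2))
      (some (i + 1)) (some (i + 1 + PySem.Int.floordiv n 2)) := by
  have hfd0 : 1 ≤ PySem.Int.floordiv n 2 := by
    rw [PySem.Int.le_floordiv_iff_mul_le (by norm_num)]; omega
  have hfdn : PySem.Int.floordiv n 2 < n := by
    rw [PySem.Int.floordiv_lt_iff_lt_mul (by norm_num)]; omega
  set fd := PySem.Int.floordiv n 2 with hfd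
  rw [PySem.List.slice_toNat _ (by omega) (by omega)]
  set N : Nat := n.toNat with hN
  set H : Nat := fd.toNat with hH
  have hlen : ((PySem.List.pyRange 0 n 1).map
      (fun k => PySem.Str.zfill (PySem.Int.toStr k) 2)).length = N := by
    rw [List.length_map, PySem.List.length_pyRange_one]; omega
  have hiN : (i + 1).toNat ≤ N := by omega
  have hHN : H ≤ N := by omega
  rw [gpF, PySem.List.pyRange_one]
  apply List.ext_getElem
  · simp only [List.length_take, List.length_drop, List.length_append, hlen,
      List.length_map, List.length_range]
    omega
  · intro k hk1 hk2
    simp only [List.length_take, List.length_drop, List.length_append, hlen,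
      List.length_map, List.length_range] at hk1 hk2
    have hkH : k < H := by omega
    have hidx : (i + 1).toNat + k < N + N := by omega
    rw [List.getElem_take, List.getElem_drop, List.getElem_map, List.getElem_map,
      List.getElem_range]
    have hmod : PySem.Int.mod (i + (1 + (k : Int))) n
        = if (i + 1).toNat + k < N then ((((i + 1).toNat + k : Nat)) : Int)
          else ((((i + 1).toNat + k - N : Nat)) : Int) := by
      have hnpos : (0:Int) < n := by omega
      have hx : i + (1 + (k : Int)) = (((i + 1).toNat + k : Nat) : Int) := by push_cast; omega
      rw [hx, PySem.Int.mod_eq_emod_of_pos hnpos]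
      split
      · rename_i h
        exact Int.emod_eq_of_lt (by positivity) (by push_cast; omega)
      · rename_i h
        rw [← Int.sub_emod_right _ n,
          Int.emod_eq_of_lt (by push_cast; omega) (by push_cast; omega)]
        push_cast; omega
    rw [hmod]
    split
    · rename_i h
      rw [List.getElem_append_left (by omega)]
      rw [List.getElem_map, PySem.List.getElem_pyRange_one]
      simp [gpLab]
    · rename_i h
      rw [List.getElem_append_right (by omega)]
      rw [List.getElem_map, PySem.List.getElem_pyRange_one]
      simp only [hlen]
      simp [gpLab]

-- A's items list, characterized
theorem gp_items (n : Int) (hn : 1 < n) :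
    (gpA n n).items = (PySem.List.pyRange 0 n 1).map (fun i => (i, gpF n i)) := by
  obtain ⟨hk, hg⟩ := gp_outer n hn n.toNat (by omega)
  have hcast : ((n.toNat : Nat) : Int) = n := by omega
  rw [hcast] at hk hg
  have hnodup : (gpA n n).keys.Nodup := by
    rw [hk]; exact PySem.List.nodup_pyRange_one 0 n
  rw [PySem.Dict.items_eq_map_keys _ hnodup [], hk]
  apply List.map_congr_left
  intro i hi
  rw [PySem.List.mem_pyRange_one] at hi
  rw [hg i hi.1 hi.2]

-- ===== VERDICT (by name: the statement is the Claim_ definition above) =====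
theorem get_parity_blocks_py_spec : Claim_equal_get_parity_blocks_py := by
  intro n _hdom
  unfold Spec_get_parity_blocks_py
  by_cases hn : n > 1
  · have hA : get_parity_blocks_py n = some (gpA n n).items := by
      simp only [get_parity_blocks_py, hn, if_true]
      rfl
    rw [hA, gp_items n hn]
    simp only [get_parity_blocks_py_alt, hn, if_true, Option.some.injEq]
    apply List.map_congr_left
    intro i hi
    rw [PySem.List.mem_pyRange_one] at hi
    rw [gpF_eq_slice n i hn hi.1 hi.2]
  · simp [get_parity_blocks_py, get_parity_blocks_py_alt, hn]
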